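-- pv_equiv track=rewrite | github.com/josuecb/WikiScrape | collegeContact.py | addLoc
-- ===== SOURCE A (Python) =====
-- def addLoc(titles, values, school, contactlist):
--     i = 0
--     while i < contactlist.__len__():
--         if contactlist[i] == school:
--             # University phone number, address 1, city, region, postal-code
--             # These titles (keys) will be changed after key_changer method
--             i += 1#go to address
--             titles.append('uni address 1')
--             values.append(contactlist[i])
--             i += 1# go to city
--             titles.append('uni city')
--             values.append(contactlist[i])
--             i += 1# go to state/region
--             titles.append('uni region')
--             values.append(contactlist[i])
--             i += 1# postal
--             titles.append('uni postalcode')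
--             values.append(contactlist[i])
--             i += 1 #phone
--             if contactlist[i] != 'NONE':
--                 titles.append('uni phone')
--                 values.append(contactlist[i])
--             break
--         i += 7
--     return titles, values
-- ===== SOURCE B (Python) =====
-- def addLoc(titles, values, school, contactlist):
--     # Chunk the flat list into 7-field records, find the school's record,
--     # then extend titles/values with the address fields in one batch.
--     records = [contactlist[j:j + 7] for j in range(0, len(contactlist), 7)]
--     rec = next((r for r in records if r[0] == school), None)
--     if rec is not None:
--         addr, city, region, postal, phone = rec[1:6]
--         titles += ['uni address 1', 'uni city', 'uni region', 'uni postalcode']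
--         values += [addr, city, region, postal]
--         if phone != 'NONE':
--             titles.append('uni phone')
--             values.append(phone)
--     return titles, values
-- ===== Notes on version B (the rewrite author's own statement) =====
-- stated objective: idiomatic
-- what changed: B decomposes the task into data first: it chunks the flat list into 7-field records, finds the school's record with next() over the chunk list, and then extends titles/values in one batch with a slice-unpacked record, instead of A's manual while-loop with an index mutated step by step and six appends inlined in the loop body.
import Mathlib
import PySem

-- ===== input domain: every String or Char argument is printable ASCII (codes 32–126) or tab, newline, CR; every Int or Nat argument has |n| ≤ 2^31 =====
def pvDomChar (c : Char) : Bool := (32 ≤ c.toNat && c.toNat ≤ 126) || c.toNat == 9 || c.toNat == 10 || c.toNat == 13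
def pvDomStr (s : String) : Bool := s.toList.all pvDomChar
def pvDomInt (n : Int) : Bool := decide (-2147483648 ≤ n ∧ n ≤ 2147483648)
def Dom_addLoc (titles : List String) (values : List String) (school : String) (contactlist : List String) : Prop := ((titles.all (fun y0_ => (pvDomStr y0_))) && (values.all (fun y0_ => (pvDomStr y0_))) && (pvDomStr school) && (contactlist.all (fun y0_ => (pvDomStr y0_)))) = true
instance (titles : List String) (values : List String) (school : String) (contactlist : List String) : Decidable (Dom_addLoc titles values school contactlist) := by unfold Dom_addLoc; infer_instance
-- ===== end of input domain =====

-- B chunks the flat contact list into 7-field records, finds the school's record and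
-- batch-extends titles/values, instead of A's index-stepping while loop (idiomatic; same cost).
-- A mutates `titles`/`values` in place in Python (so does B, identically); the equivalence
-- proved here is about the returned pair.


-- ===== PORT A =====
-- A's while loop: index i starts at 0, steps by 7; on the first aligned match it performs
-- the five paired appends (phone guarded by ≠ 'NONE') and breaks.  Out-of-range reads
-- contactlist[i+k] (an IndexError in Python) are excluded by Pre_addLoc; the port reads ""
-- there (never reached inside Pre_addLoc).
def addLocLoop (school : String) (contactlist : List String) (titles values : List String) (i : Nat) : List String × List String :=
  if i < contactlist.length then
    if contactlist.getD i "" == school then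
      let titles := titles ++ ["uni address 1"]
      let values := values ++ [contactlist.getD (i+1) ""]
      let titles := titles ++ ["uni city"]
      let values := values ++ [contactlist.getD (i+2) ""]
      let titles := titles ++ ["uni region"]
      let values := values ++ [contactlist.getD (i+3) ""]
      let titles := titles ++ ["uni postalcode"]
      let values := values ++ [contactlist.getD (i+4) ""]
      if contactlist.getD (i+5) "" != "NONE" then
        (titles ++ ["uni phone"], values ++ [contactlist.getD (i+5) ""])
      else
        (titles, values)
    else
      addLocLoop school contactlist titles values (i + 7)
  else
    (titles, values)
termination_by contactlist.length - i

def addLoc (titles : List String) (values : List String) (school : String) (contactlist : List String) : List String × List String :=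
  addLocLoop school contactlist titles values 0

-- ===== PORT B =====
-- Source B: records = [contactlist[j:j+7] for j in range(0, len(contactlist), 7)];
-- rec = next((r for r in records if r[0] == school), None); batch extends; guarded phone.
-- The 5-way unpacking `addr, city, region, postal, phone = rec[1:6]` raises ValueError when
-- the slice is short (outside Pre_addLoc); the port returns (titles, values) there.
def addLoc_alt (titles : List String) (values : List String) (school : String) (contactlist : List String) : List String × List String :=
  let records := (PySem.List.pyRange 0 (contactlist.length : Int) 7).map
    (fun j => PySem.List.slice contactlist (some j) (some (j + 7)))
  match records.find? (fun r => r.getD 0 "" == school) with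
  | none => (titles, values)
  | some rec =>
    match PySem.List.slice rec (some 1) (some 6) with
    | [addr, city, region, postal, phone] =>
      let titles := titles ++ ["uni address 1", "uni city", "uni region", "uni postalcode"]
      let values := values ++ [addr, city, region, postal]
      if phone ≠ "NONE" then (titles ++ ["uni phone"], values ++ [phone])
      else (titles, values)
    | _ => (titles, values)

-- ===== PRECONDITION & SPEC =====
-- Pre_addLoc excludes exactly the inputs on which Python A raises IndexError: those where the
-- first aligned (index ≡ 0 mod 7) occurrence of `school` sits fewer than 6 slots from the end.
def Pre_addLoc (titles : List String) (values : List String) (school : String) (contactlist : List String) : Prop :=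
  ∀ j ∈ List.range contactlist.length, j % 7 = 0 → contactlist.getD j "" = school →
    contactlist.length ≤ j + 5 →
      ∃ k ∈ List.range j, k % 7 = 0 ∧ contactlist.getD k "" = school
instance (titles : List String) (values : List String) (school : String) (contactlist : List String) : Decidable (Pre_addLoc titles values school contactlist) := by unfold Pre_addLoc; infer_instance

def pvWitness_addLoc : List String × List String × String × List String :=
  (["t0"], ["v0"], "X", ["X", "addr", "city", "reg", "12345", "555", "extra"])

def Spec_addLoc (titles : List String) (values : List String) (school : String) (contactlist : List String) (out : List String × List String) : Prop := out = addLoc_alt titles values school contactlist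
instance (titles : List String) (values : List String) (school : String) (contactlist : List String) (out : List String × List String) : Decidable (Spec_addLoc titles values school contactlist out) := by unfold Spec_addLoc; infer_instance

-- ===== CLAIM (what is proved, stated in full; the proofs are below) =====
def Claim_equal_addLoc : Prop := ∀ (titles : List String) (values : List String) (school : String) (contactlist : List String), Dom_addLoc titles values school contactlist → Pre_addLoc titles values school contactlist → Spec_addLoc titles values school contactlist (addLoc titles values school contactlist)

-- ===== LEMMAS AND PROOFS =====

-- B's search-and-extend phase, started at chunk index i (proof helper).
def altTail (titles values : List String) (school : String) (contactlist : List String) (i : Nat) : List String × List String :=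
  match ((PySem.List.pyRange (i : Int) (contactlist.length : Int) 7).map
      (fun j => PySem.List.slice contactlist (some j) (some (j + 7)))).find?
      (fun r => r.getD 0 "" == school) with
  | none => (titles, values)
  | some rec =>
    match PySem.List.slice rec (some 1) (some 6) with
    | [addr, city, region, postal, phone] =>
      let titles := titles ++ ["uni address 1", "uni city", "uni region", "uni postalcode"]
      let values := values ++ [addr, city, region, postal]
      if phone ≠ "NONE" then (titles ++ ["uni phone"], values ++ [phone])
      else (titles, values)
    | _ => (titles, values)

lemma addLoc_alt_eq_altTail (titles values : List String) (school : String) (contactlist : List String) :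
    addLoc_alt titles values school contactlist = altTail titles values school contactlist 0 := by
  simp [addLoc_alt, altTail]

lemma pyRange7_nil (a b : Int) (h : b ≤ a) : PySem.List.pyRange a b 7 = [] := by
  rw [PySem.List.pyRange_of_pos a b (by norm_num)]
  simp [show ¬ a < b by omega]

lemma pyRange7_cons (a b : Int) (h : a < b) :
    PySem.List.pyRange a b 7 = a :: PySem.List.pyRange (a + 7) b 7 := by
  rw [PySem.List.pyRange_of_pos a b (by norm_num),
      PySem.List.pyRange_of_pos (a + 7) b (by norm_num)]
  by_cases h7 : a + 7 < b
  · rw [if_pos h, if_pos h7]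
    have hn : ((b - a + 7 - 1) / 7).toNat = ((b - (a + 7) + 7 - 1) / 7).toNat + 1 := by omega
    rw [hn, List.range_succ_eq_map]
    simp [List.map_map, Function.comp]
    intro k _
    ring
  · rw [if_pos h, if_neg h7]
    have hn : ((b - a + 7 - 1) / 7).toNat = 1 := by omega
    rw [hn]
    simp

-- head of each record: ((contactlist.drop i).take 7).getD 0 "" = contactlist.getD i ""
lemma slice_head (contactlist : List String) (i : Nat) :
    (PySem.List.slice contactlist (some (i : Int)) (some ((i : Int) + 7))).getD 0 "" =
      contactlist.getD i "" := by
  have : ((i : Int) + 7) = ((i : Int) + ((7 : Nat) : Int)) := by norm_num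
  rw [this, PySem.List.slice_natCast_add]
  rw [List.getD_eq_getElem?_getD, List.getD_eq_getElem?_getD]
  rw [List.getElem?_take_of_lt (by norm_num), List.getElem?_drop]
  simp

-- fields of the matched record, given it is a full one
lemma slice_fields (contactlist : List String) (i : Nat) (h : i + 5 < contactlist.length) :
    PySem.List.slice (PySem.List.slice contactlist (some (i : Int)) (some ((i : Int) + 7)))
        (some 1) (some 6) =
      [contactlist.getD (i+1) "", contactlist.getD (i+2) "", contactlist.getD (i+3) "",
       contactlist.getD (i+4) "", contactlist.getD (i+5) ""] := by
  have h7 : ((i : Int) + 7) = ((i : Int) + ((7 : Nat) : Int)) := by norm_num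
  have h16 : ((1 : Int) = ((1 : Nat) : Int)) ∧ ((6 : Int) = ((6 : Nat) : Int)) := by norm_num
  rw [h7, PySem.List.slice_natCast_add, h16.1, h16.2, PySem.List.slice_natCast]
  obtain ⟨a, l1, hl1⟩ := List.exists_cons_of_ne_nil
    (l := contactlist.drop i) (by simp; omega)
  obtain ⟨b, l2, hl2⟩ := List.exists_cons_of_ne_nil
    (l := l1) (by have := congrArg List.length hl1; simp at this; intro hc; subst hc; simp at this; omega)
  obtain ⟨c, l3, hl3⟩ := List.exists_cons_of_ne_nil
    (l := l2) (by have := congrArg List.length hl1; rw [hl2] at this; simp at this; intro hc; subst hc; simp at this; omega)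
  obtain ⟨d, l4, hl4⟩ := List.exists_cons_of_ne_nil
    (l := l3) (by have := congrArg List.length hl1; rw [hl2, hl3] at this; simp at this; intro hc; subst hc; simp at this; omega)
  obtain ⟨e, l5, hl5⟩ := List.exists_cons_of_ne_nil
    (l := l4) (by have := congrArg List.length hl1; rw [hl2, hl3, hl4] at this; simp at this; intro hc; subst hc; simp at this; omega)
  obtain ⟨f, l6, hl6⟩ := List.exists_cons_of_ne_nil
    (l := l5) (by have := congrArg List.length hl1; rw [hl2, hl3, hl4, hl5] at this; simp at this; intro hc; subst hc; simp at this; omega)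
  have hk : ∀ k : Nat, k ≤ 5 → contactlist.getD (i + k) "" = (contactlist.drop i).getD k "" := by
    intro k _
    rw [List.getD_eq_getElem?_getD, List.getD_eq_getElem?_getD, List.getElem?_drop]
  rw [hk 1 (by omega), hk 2 (by omega), hk 3 (by omega), hk 4 (by omega), hk 5 (by omega)]
  rw [hl1, hl2, hl3, hl4, hl5, hl6]
  simp [List.take_succ_cons, List.getD]

-- main loop invariant: A's loop from index i equals B's search from chunk start i,
-- provided every short aligned match at or after i has an earlier aligned match at or after i.
lemma loop_eq (school : String) (contactlist : List String) :
    ∀ n i titles values, contactlist.length - i ≤ n →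
    (∀ j : Nat, i ≤ j → 7 ∣ (j - i) → j < contactlist.length →
        contactlist.getD j "" = school → contactlist.length ≤ j + 5 →
        ∃ k : Nat, i ≤ k ∧ k < j ∧ 7 ∣ (k - i) ∧ contactlist.getD k "" = school) →
    addLocLoop school contactlist titles values i = altTail titles values school contactlist i := by
  intro n
  induction n with
  | zero =>
    intro i titles values hn _
    have hge : contactlist.length ≤ i := by omega
    rw [addLocLoop, if_neg (by omega)]
    rw [altTail, pyRange7_nil _ _ (by exact_mod_cast hge)]
    simp
  | succ n ih =>
    intro i titles values hn H
    by_cases hi : i < contactlist.length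
    · rw [altTail, pyRange7_cons _ _ (by exact_mod_cast hi)]
      rw [List.map_cons, List.find?_cons]
      by_cases hm : contactlist.getD i "" = school
      · -- match at i
        have hpred : ((PySem.List.slice contactlist (some (i : Int)) (some ((i : Int) + 7))).getD 0 "" == school) = true := by
          rw [slice_head contactlist i, hm]; simp
        rw [hpred]
        have hfull : i + 5 < contactlist.length := by
          by_contra hc
          obtain ⟨k, hk1, hk2, _, _⟩ := H i le_rfl (by simp) hi hm (by omega)
          omega
        rw [addLocLoop, if_pos hi, if_pos (show (contactlist.getD i "" == school) = true from beq_iff_eq.mpr hm)]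
        simp [slice_fields contactlist i hfull]
      · -- no match at i: step to i + 7
        have hpred : ((PySem.List.slice contactlist (some (i : Int)) (some ((i : Int) + 7))).getD 0 "" == school) = false := by
          rw [slice_head contactlist i]; simpa using hm
        rw [hpred]
        rw [addLocLoop, if_pos hi, if_neg (by simpa using hm)]
        have hrec := ih (i + 7) titles values (by omega) (by
          intro j hj hdvd hjlen hjm hjshort
          obtain ⟨k, hk1, hk2, hk3, hk4⟩ := H j (by omega) (by omega) hjlen hjm hjshort
          refine ⟨k, ?_, hk2, ?_, hk4⟩
          · rcases Nat.eq_or_lt_of_le hk1 with h | h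
            · exact absurd (h ▸ hk4) hm
            · omega
          · have : k ≠ i := fun hc => hm (hc ▸ hk4)
            omega)
        rw [hrec, altTail]
        have : ((i : Int) + 7) = (((i + 7 : Nat) : Int)) := by push_cast; ring
        rw [this]
    · rw [addLocLoop, if_neg hi]
      rw [altTail, pyRange7_nil _ _ (by exact_mod_cast Nat.le_of_not_lt hi)]
      simp

-- ===== VERDICT (by name: the statement is the Claim_ definition above) =====
theorem addLoc_spec : Claim_equal_addLoc := by
  intro titles values school contactlist _ hpre
  unfold Spec_addLoc addLoc
  rw [addLoc_alt_eq_altTail]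
  apply loop_eq school contactlist contactlist.length 0 titles values (by omega)
  intro j _ hdvd hjlen hjm hjshort
  obtain ⟨k, hk1, hk2, hk3⟩ := hpre j (List.mem_range.mpr hjlen)
    (by omega) hjm hjshort
  exact ⟨k, Nat.zero_le _, List.mem_range.mp hk1, by omega, hk3⟩
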